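-- pv_equiv track=rewrite | github.com/geethdev/IEEE-Xtreme-18.0 | invertible-pairs.py | solve_test_case
-- ===== SOURCE A (Python) =====
-- def max_subarray_sum(arr):
--     max_sum = float('-inf')
--     curr_sum = 0
--     for num in arr:
--         curr_sum = max(num, curr_sum + num)
--         max_sum = max(max_sum, curr_sum)
--     return max_sum
--
-- def solve_test_case(n, arr):
--
--     pairs = [(arr[i], arr[i+1]) for i in range(0, n, 2)]
--     best_sum = float('-inf')
--
--     pairs_to_consider = []
--     for i, (x, y) in enumerate(pairs):
--         if x < 0 or y < 0:
--             pairs_to_consider.append(i)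
--
--     for mask in range(1 << len(pairs_to_consider)):
--         curr_arr = list(arr)
--
--         for i in range(len(pairs_to_consider)):
--             if mask & (1 << i):
--                 pair_idx = pairs_to_consider[i]
--                 curr_arr[pair_idx*2] *= -1
--                 curr_arr[pair_idx*2 + 1] *= -1
--
--         curr_max = max_subarray_sum(curr_arr)
--         best_sum = max(best_sum, curr_max)
--
--     return best_sum
-- ===== SOURCE B (Python) =====
-- def solve_test_case(n, arr):
--     # Kadane DP over pair blocks: carry best subarray sum ending at the current
--     # position maximised over all allowed pair sign-flips, branching per pair
--     # into flipped/unflipped and merging with max.  O(len(arr)) instead of A's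
--     # O(2^k * len(arr)) enumeration of flip masks.
--     pairs = [(arr[i], arr[i + 1]) for i in range(0, n, 2)]
--     tail = arr[2 * len(pairs):]
--     best = None
--     c = 0  # best sum of a subarray ending just before the next position (0 = empty)
--     for (x, y) in pairs:
--         c1 = max(x, c + x)
--         m1 = c1
--         c1 = max(y, c1 + y)
--         m1 = max(m1, c1)
--         if x < 0 or y < 0:
--             c2 = max(-x, c - x)
--             m2 = c2
--             c2 = max(-y, c2 - y)
--             m2 = max(m2, c2)
--             c = max(c1, c2)
--             m1 = max(m1, m2)
--         else:
--             c = c1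
--         best = m1 if best is None else max(best, m1)
--     for v in tail:
--         c = max(v, c + v)
--         best = c if best is None else max(best, c)
--     return best
-- ===== Notes on version B (the rewrite author's own statement) =====
-- stated objective: faster
-- what changed: Replaced the 2^k enumeration of all flip-mask subsets (each re-running Kadane on a freshly flipped copy of arr) by a single left-to-right Kadane DP over the pair blocks that branches each flippable pair into flipped/unflipped and merges the two best-ending sums with max.
-- outside the precondition, e.g. on solve_test_case(0, []): A returns -inf, B returns None; on solve_test_case(2, [5]): A raises IndexError, B raises IndexError
import Mathlib
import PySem

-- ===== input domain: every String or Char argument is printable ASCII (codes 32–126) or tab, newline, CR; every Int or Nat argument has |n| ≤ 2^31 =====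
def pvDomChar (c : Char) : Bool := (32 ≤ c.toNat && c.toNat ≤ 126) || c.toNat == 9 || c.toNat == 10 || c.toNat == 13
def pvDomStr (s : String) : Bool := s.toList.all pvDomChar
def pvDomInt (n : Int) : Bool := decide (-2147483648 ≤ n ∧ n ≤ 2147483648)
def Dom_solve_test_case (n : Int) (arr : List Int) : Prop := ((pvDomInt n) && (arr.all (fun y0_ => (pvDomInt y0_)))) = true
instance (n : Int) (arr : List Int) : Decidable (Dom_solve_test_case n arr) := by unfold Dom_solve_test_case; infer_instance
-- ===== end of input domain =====

-- B replaces A's O(2^k · n) enumeration of all pair-flip masks by one O(n) Kadane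
-- DP over the pair blocks (branch each flippable pair, merge with max).

-- ===== PORT A =====

-- max(m, c) where m starts as float('-inf') (represented by none)
def omax1 (m : Option Int) (c : Int) : Option Int :=
  some (match m with | none => c | some b => max b c)

-- max(a, b) for two possibly -inf values
def omax : Option Int → Option Int → Option Int
  | none, b => b
  | a, none => a
  | some a, some b => some (max a b)

-- one iteration of max_subarray_sum's loop: (max_sum, curr_sum) → updated
def kadaneStep (st : Option Int × Int) (num : Int) : Option Int × Int :=
  let c := max num (st.2 + num)
  (omax1 st.1 c, c)

-- max_subarray_sum: float('-inf') result (empty list) is none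
def max_subarray_sum (arr : List Int) : Option Int :=
  (arr.foldl kadaneStep (none, 0)).1

-- curr_arr[j] *= -1  (exact for an in-range index j, which Pre_ guarantees)
def pyFlip (l : List Int) (j : Int) : List Int :=
  PySem.List.pySetD l j (-(PySem.List.pyGetD l j 0))

-- flip the pair with index p: curr_arr[p*2] *= -1; curr_arr[p*2+1] *= -1
def flip2 (l : List Int) (p : Int) : List Int :=
  pyFlip (pyFlip l (p * 2)) (p * 2 + 1)

def solve_test_case (n : Int) (arr : List Int) : Int :=
  let pairs : List (Int × Int) := (PySem.List.pyRange 0 n 2).map (fun i =>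
    (PySem.List.pyGetD arr i 0, PySem.List.pyGetD arr (i + 1) 0))
  let ptc : List Int := (PySem.List.enumerate pairs).foldl (fun acc ixy =>
    if ixy.2.1 < 0 ∨ ixy.2.2 < 0 then acc ++ [ixy.1] else acc) []
  let best : Option Int := (PySem.List.pyRange 0 ((1 : Int) <<< ptc.length) 1).foldl
    (fun best mask =>
      let curr := (List.range ptc.length).foldl (fun cur (i : Nat) =>
        if PySem.Int.band mask ((1 : Int) <<< i) ≠ 0 then flip2 cur (ptc.getD i 0)
        else cur) arr
      omax best (max_subarray_sum curr)) none
  best.getD 0   -- under Pre_ best is always `some`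

-- ===== PORT B =====

def solve_test_case_alt (n : Int) (arr : List Int) : Int :=
  let pairs : List (Int × Int) := (PySem.List.pyRange 0 n 2).map (fun i =>
    (PySem.List.pyGetD arr i 0, PySem.List.pyGetD arr (i + 1) 0))
  let tail := PySem.List.slice arr (some (2 * (pairs.length : Int))) none
  let st : Option Int × Int := pairs.foldl (fun st xy =>
    let c1a := max xy.1 (st.2 + xy.1)
    let c1 := max xy.2 (c1a + xy.2)
    let m1 := max c1a c1
    if xy.1 < 0 ∨ xy.2 < 0 then
      let c2a := max (-xy.1) (st.2 - xy.1)
      let c2 := max (-xy.2) (c2a - xy.2)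
      let m2 := max c2a c2
      (omax1 st.1 (max m1 m2), max c1 c2)
    else
      (omax1 st.1 m1, c1)) (none, 0)
  let fin : Option Int × Int := tail.foldl (fun st v =>
    let c := max v (st.2 + v)
    (omax1 st.1 c, c)) st
  fin.1.getD 0   -- best is None only for empty arr, excluded by Pre_

-- ===== PRECONDITION & SPEC =====
-- Pre_ excludes the inputs where A raises IndexError (a pair index beyond arr, i.e.
-- n > 0 and arr shorter than n + n % 2) and the inputs with arr = [] on which A
-- returns float('-inf'), which is not an int.
def Pre_solve_test_case (n : Int) (arr : List Int) : Prop :=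
  arr ≠ [] ∧ (n ≤ 0 ∨ n + PySem.Int.mod n 2 ≤ (arr.length : Int))
instance (n : Int) (arr : List Int) : Decidable (Pre_solve_test_case n arr) := by
  unfold Pre_solve_test_case; infer_instance

def pvWitness_solve_test_case : Int × List Int := (4, [3, -1, -2, 5])

def Spec_solve_test_case (n : Int) (arr : List Int) (out : Int) : Prop := out = solve_test_case_alt n arr
instance (n : Int) (arr : List Int) (out : Int) : Decidable (Spec_solve_test_case n arr out) := by unfold Spec_solve_test_case; infer_instance

-- ===== CLAIM (what is proved, stated in full; the proofs are below) =====
def Claim_equal_solve_test_case : Prop := ∀ (n : Int) (arr : List Int), Dom_solve_test_case n arr → Pre_solve_test_case n arr → Spec_solve_test_case n arr (solve_test_case n arr)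

-- ===== LEMMAS AND PROOFS =====

-- ---- proof-side model: Kadane state algebra ----

-- two Kadane steps through one pair block
def blk (s : Option Int × Int) (q : Int × Int) : Option Int × Int :=
  kadaneStep (kadaneStep s q.1) q.2

-- componentwise max of two Kadane states
def joinS (s t : Option Int × Int) : Option Int × Int := (omax s.1 t.1, max s.2 t.2)

def flat (ps : List (Int × Int)) : List Int := ps.flatMap (fun q => [q.1, q.2])

-- branching reference recursion: best over all flip choices, pair by pair
def R : List (Int × Int) → List Int → Option Int × Int → Option Int
  | [], t, s => (t.foldl kadaneStep s).1
  | q :: ps, t, s =>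
    if q.1 < 0 ∨ q.2 < 0 then
      omax (R ps t (blk s q)) (R ps t (blk s (-q.1, -q.2)))
    else R ps t (blk s q)

-- flip the j-th pair of a pair list
def myMod : List (Int × Int) → Nat → List (Int × Int)
  | [], _ => []
  | q :: ps, 0 => (-q.1, -q.2) :: ps
  | q :: ps, j+1 => q :: myMod ps j

-- branching over an explicit list of (pair-)positions
def T2 : List Nat → List (Int × Int) → List Int → Option Int × Int → Option Int
  | [], ps, t, s => ((flat ps ++ t).foldl kadaneStep s).1
  | j :: r, ps, t, s => omax (T2 r ps t s) (T2 r (myMod ps j) t s)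

-- branching over flip positions acting on the raw array
def T' : List Int → List Int → Option Int
  | [], l => max_subarray_sum l
  | p :: r, l => omax (T' r l) (T' r (flip2 l p))

-- indices of the flippable pairs
def eligIdxN : List (Int × Int) → List Nat
  | [] => []
  | q :: ps =>
    if q.1 < 0 ∨ q.2 < 0 then 0 :: (eligIdxN ps).map (· + 1)
    else (eligIdxN ps).map (· + 1)

-- Nat-index single-position flip
def flipN (l : List Int) (j : Nat) : List Int := l.set j (-(l.getD j 0))

-- A's inner mask loop, with the mask as a Nat
def applyM (l : List Int) (ptc : List Int) (m : Nat) : List Int :=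
  (List.range ptc.length).foldl
    (fun cur i => if m.testBit i then flip2 cur (ptc.getD i 0) else cur) l

-- ---- omax algebra ----

theorem omax_none_right (a : Option Int) : omax a none = a := by cases a <;> rfl

theorem omax_assoc (a b c : Option Int) : omax (omax a b) c = omax a (omax b c) := by
  cases a <;> cases b <;> cases c <;> simp [omax, max_assoc]

theorem omax_comm (a b : Option Int) : omax a b = omax b a := by
  cases a <;> cases b <;> simp [omax, max_comm]

theorem omax_omax_comm (a b c d : Option Int) :
    omax (omax a b) (omax c d) = omax (omax a c) (omax b d) := by
  rw [omax_assoc, omax_assoc, ← omax_assoc b, ← omax_assoc c, omax_comm b c]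

theorem omax1_omax1 (m : Option Int) (a b : Int) :
    omax1 (omax1 m a) b = omax1 m (max a b) := by
  cases m <;> simp [omax1, max_assoc]

theorem omax_omax1 (m : Option Int) (a b : Int) :
    omax (omax1 m a) (omax1 m b) = omax1 m (max a b) := by
  cases m with
  | none => rfl
  | some v => show some (max (max v a) (max v b)) = some (max v (max a b))
              rw [max_max_max_comm, max_self]

theorem foldl_omax_shift {α : Type} (f : α → Option Int) (l : List α) (b c : Option Int) :
    l.foldl (fun acc x => omax acc (f x)) (omax b c) =
      omax b (l.foldl (fun acc x => omax acc (f x)) c) := by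
  induction l generalizing c with
  | nil => rfl
  | cons x xs ih => simpa [omax_assoc] using ih (omax c (f x))

-- ---- join homomorphism ----

theorem step_join (s t : Option Int × Int) (x : Int) :
    kadaneStep (joinS s t) x = joinS (kadaneStep s x) (kadaneStep t x) := by
  obtain ⟨m1, c1⟩ := s
  obtain ⟨m2, c2⟩ := t
  cases m1 <;> cases m2 <;>
    simp [kadaneStep, joinS, omax1, omax, Prod.ext_iff] <;>
    (try constructor) <;> (simp only [Int.max_def]; split_ifs <;> omega)

theorem foldK_join (l : List Int) (s t : Option Int × Int) :
    l.foldl kadaneStep (joinS s t) = joinS (l.foldl kadaneStep s) (l.foldl kadaneStep t) := by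
  induction l generalizing s t with
  | nil => rfl
  | cons x xs ih => simp only [List.foldl_cons, step_join, ih]

theorem R_join (ps : List (Int × Int)) (t : List Int) (s u : Option Int × Int) :
    R ps t (joinS s u) = omax (R ps t s) (R ps t u) := by
  induction ps generalizing s u with
  | nil => show (t.foldl kadaneStep (joinS s u)).1 = _
           rw [foldK_join]; rfl
  | cons q ps ih =>
    have hb : ∀ q' : Int × Int, blk (joinS s u) q' = joinS (blk s q') (blk u q') := by
      intro q'; unfold blk; rw [step_join, step_join]
    by_cases h : q.1 < 0 ∨ q.2 < 0
    · simp only [R, if_pos h, hb, ih, omax_omax_comm]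
    · simp only [R, if_neg h, hb, ih]

-- ---- B equals R ----

theorem Bstep_eq (s : Option Int × Int) (xy : Int × Int) :
    (let c1a := max xy.1 (s.2 + xy.1)
     let c1 := max xy.2 (c1a + xy.2)
     let m1 := max c1a c1
     if xy.1 < 0 ∨ xy.2 < 0 then
       let c2a := max (-xy.1) (s.2 - xy.1)
       let c2 := max (-xy.2) (c2a - xy.2)
       let m2 := max c2a c2
       (omax1 s.1 (max m1 m2), max c1 c2)
     else (omax1 s.1 m1, c1)) =
    if xy.1 < 0 ∨ xy.2 < 0 then joinS (blk s xy) (blk s (-xy.1, -xy.2))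
    else blk s xy := by
  by_cases h : xy.1 < 0 ∨ xy.2 < 0 <;>
    simp [h, blk, joinS, kadaneStep, omax1_omax1, omax_omax1, sub_eq_add_neg]

theorem Bfold_eq_R (ps : List (Int × Int)) (t : List Int) (s : Option Int × Int) :
    ((t.foldl (fun st v => let c := max v (st.2 + v); (omax1 st.1 c, c))
      (ps.foldl (fun st (xy : Int × Int) =>
        let c1a := max xy.1 (st.2 + xy.1)
        let c1 := max xy.2 (c1a + xy.2)
        let m1 := max c1a c1
        if xy.1 < 0 ∨ xy.2 < 0 then
          let c2a := max (-xy.1) (st.2 - xy.1)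
          let c2 := max (-xy.2) (c2a - xy.2)
          let m2 := max c2a c2
          (omax1 st.1 (max m1 m2), max c1 c2)
        else
          (omax1 st.1 m1, c1)) s)) : Option Int × Int).1 = R ps t s := by
  induction ps generalizing s with
  | nil => rfl
  | cons q ps ih =>
    rw [List.foldl_cons, Bstep_eq]
    by_cases h : q.1 < 0 ∨ q.2 < 0
    · rw [if_pos h, ih, R_join]
      simp only [R, if_pos h]
    · rw [if_neg h, ih]
      simp only [R, if_neg h]

-- ---- A's flip primitive on Nat indices ----

theorem pyFlip_nonneg (l : List Int) (j : Int) (hj : 0 ≤ j) :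
    pyFlip l j = flipN l j.toNat := by
  unfold pyFlip flipN
  rw [← Int.toNat_of_nonneg hj, PySem.List.pyGetD_natCast,
    PySem.List.pySetD_of_nonneg _ _ (by positivity)]
  simp [max_eq_left hj]

theorem flip2_eq_flipN (l : List Int) (p : Int) (hp : 0 ≤ p) :
    flip2 l p = flipN (flipN l (2 * p.toNat)) (2 * p.toNat + 1) := by
  unfold flip2
  rw [pyFlip_nonneg _ _ (by omega), pyFlip_nonneg _ _ (by omega)]
  have h1 : (p * 2).toNat = 2 * p.toNat := by omega
  have h2 : (p * 2 + 1).toNat = 2 * p.toNat + 1 := by omega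
  rw [h1, h2]

theorem flipN_comm (l : List Int) (i j : Nat) (hij : i ≠ j) :
    flipN (flipN l i) j = flipN (flipN l j) i := by
  unfold flipN
  have h1 : (l.set i (-(l.getD i 0))).getD j 0 = l.getD j 0 := by
    rw [List.getD_eq_getElem?_getD, List.getElem?_set_ne hij, ← List.getD_eq_getElem?_getD]
  have h2 : (l.set j (-(l.getD j 0))).getD i 0 = l.getD i 0 := by
    rw [List.getD_eq_getElem?_getD, List.getElem?_set_ne (Ne.symm hij), ← List.getD_eq_getElem?_getD]
  rw [h1, h2, List.set_comm _ _ hij]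

theorem flip2_comm (l : List Int) (p q : Int) (hp : 0 ≤ p) (hq : 0 ≤ q) :
    flip2 (flip2 l p) q = flip2 (flip2 l q) p := by
  by_cases hpq : p = q
  · subst hpq; rfl
  · rw [flip2_eq_flipN l p hp, flip2_eq_flipN _ q hq, flip2_eq_flipN l q hq,
      flip2_eq_flipN _ p hp]
    rw [flipN_comm (flipN l (2 * p.toNat)) (2 * p.toNat + 1) (2 * q.toNat) (by omega),
      flipN_comm l (2 * p.toNat) (2 * q.toNat) (by omega),
      flipN_comm (flipN (flipN l (2 * q.toNat)) (2 * p.toNat)) (2 * p.toNat + 1)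
        (2 * q.toNat + 1) (by omega),
      flipN_comm (flipN l (2 * q.toNat)) (2 * p.toNat) (2 * q.toNat + 1) (by omega)]

-- ---- the mask loop equals the branching recursion T' ----

theorem getD_nonneg_of_mem (ptc : List Int) (h : ∀ p ∈ ptc, 0 ≤ p) (i : Nat) :
    0 ≤ ptc.getD i 0 := by
  by_cases hi : i < ptc.length
  · rw [List.getD_eq_getElem _ _ hi]
    exact h _ (List.getElem_mem hi)
  · rw [List.getD_eq_default _ _ (by omega)]

theorem applyM_flip_comm (ptc : List Int) (h : ∀ p ∈ ptc, 0 ≤ p) (l : List Int)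
    (p : Int) (hp : 0 ≤ p) (m : Nat) :
    applyM (flip2 l p) ptc m = flip2 (applyM l ptc m) p := by
  unfold applyM
  generalize List.range ptc.length = idxl
  induction idxl generalizing l with
  | nil => rfl
  | cons i idxl ih =>
    simp only [List.foldl_cons]
    by_cases hb : m.testBit i
    · simp only [hb, if_true]
      rw [flip2_comm l p (ptc.getD i 0) hp (getD_nonneg_of_mem ptc h i), ih]
    · simp only [hb]
      exact ih _

theorem T'_snoc (r : List Int) (p : Int) (l : List Int)
    (h : ∀ q ∈ r, 0 ≤ q) (hp : 0 ≤ p) :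
    T' (r ++ [p]) l = omax (T' r l) (T' r (flip2 l p)) := by
  induction r generalizing l with
  | nil => rfl
  | cons a r ih =>
    have ha : 0 ≤ a := h a (by simp)
    have hr : ∀ q ∈ r, 0 ≤ q := fun q hq => h q (by simp [hq])
    show omax (T' (r ++ [p]) l) (T' (r ++ [p]) (flip2 l a)) =
      omax (omax (T' r l) (T' r (flip2 l a))) (omax (T' r (flip2 l p)) (T' r (flip2 (flip2 l p) a)))
    rw [ih _ hr, ih _ hr, flip2_comm l a p ha hp, omax_omax_comm]

theorem applyM_lo (l r : List Int) (p : Int) (m : Nat) (hm : m < 2 ^ r.length) :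
    applyM l (r ++ [p]) m = applyM l r m := by
  unfold applyM
  have hlen : (r ++ [p]).length = r.length + 1 := by simp
  rw [hlen, List.range_succ, List.foldl_append]
  have hb : m.testBit r.length = false := Nat.testBit_lt_two_pow hm
  simp only [List.foldl_cons, List.foldl_nil, hb, Bool.false_eq_true, if_false]
  exact PySem.List.foldl_congr_mem _ _ _ _ (fun acc i hi => by
    rw [List.getD_append _ _ _ _ (List.mem_range.mp hi)])

theorem applyM_hi (l r : List Int) (p : Int) (m : Nat) (hm : m < 2 ^ r.length) :
    applyM l (r ++ [p]) (2 ^ r.length + m) = flip2 (applyM l r m) p := by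
  unfold applyM
  have hlen : (r ++ [p]).length = r.length + 1 := by simp
  rw [hlen, List.range_succ, List.foldl_append]
  have hb : (2 ^ r.length + m).testBit r.length = true := by
    rw [Nat.testBit_two_pow_add_eq, Nat.testBit_lt_two_pow hm]; rfl
  have hgd : (r ++ [p]).getD r.length 0 = p := by
    simp [List.getD_eq_getElem?_getD]
  simp only [List.foldl_cons, List.foldl_nil, hb, if_true, hgd]
  congr 1
  refine PySem.List.foldl_congr_mem _ _ _ _ ?_
  intro acc i hi
  have hik := List.mem_range.mp hi
  rw [List.getD_append _ _ _ _ hik, Nat.testBit_two_pow_add_gt hik]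

theorem maskfold (jl : List Int) (h : ∀ p ∈ jl, 0 ≤ p) (l : List Int) :
    (List.range (2 ^ jl.length)).foldl
      (fun acc m => omax acc (max_subarray_sum (applyM l jl m))) none = T' jl l := by
  revert h
  induction jl using List.reverseRecOn generalizing l with
  | nil => intro _; rfl
  | append_singleton r p ih =>
    intro h
    have hr : ∀ q ∈ r, 0 ≤ q := fun q hq => h q (by simp [hq])
    have hp : 0 ≤ p := h p (by simp)
    have hlen : (r ++ [p]).length = r.length + 1 := by simp
    rw [hlen, pow_succ, mul_two, List.range_add, List.foldl_append, List.foldl_map]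
    have h1 : List.foldl (fun acc m => omax acc (max_subarray_sum (applyM l (r ++ [p]) m)))
        none (List.range (2 ^ r.length)) = T' r l := by
      rw [PySem.List.foldl_congr_mem _ _
        (fun acc (m : Nat) => omax acc (max_subarray_sum (applyM l r m))) _
        (fun acc m hm => by rw [applyM_lo l r p m (List.mem_range.mp hm)])]
      exact ih l hr
    rw [h1]
    rw [PySem.List.foldl_congr_mem _ _
      (fun acc (m : Nat) => omax acc (max_subarray_sum (applyM (flip2 l p) r m))) _
      (fun acc m hm => by
        rw [applyM_hi l r p m (List.mem_range.mp hm),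
          ← applyM_flip_comm r hr l p hp m])]
    rw [← omax_none_right (T' r l), foldl_omax_shift, ih (flip2 l p) hr,
      T'_snoc r p l hr hp]

-- ---- flips on a decomposed array ----

theorem flat_cons (q : Int × Int) (ps : List (Int × Int)) :
    flat (q :: ps) = q.1 :: q.2 :: flat ps := by simp [flat]

theorem flipN_cons2 (x y : Int) (L : List Int) (k : Nat) :
    flipN (x :: y :: L) (k + 2) = x :: y :: flipN L k := by
  simp [flipN]

theorem flip2_flat (ps : List (Int × Int)) (j : Nat) (t : List Int) (hj : j < ps.length) :
    flip2 (flat ps ++ t) (j : Int) = flat (myMod ps j) ++ t := by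
  rw [flip2_eq_flipN _ _ (Int.natCast_nonneg j), Int.toNat_natCast]
  induction ps generalizing j t with
  | nil => simp at hj
  | cons q ps ih =>
    cases j with
    | zero => simp [flipN, flat_cons, myMod]
    | succ j =>
      have h1 : 2 * (j + 1) = 2 * j + 2 := by ring
      have h2 : 2 * j + 2 + 1 = 2 * j + 1 + 2 := by ring
      rw [flat_cons, List.cons_append, List.cons_append, h1, h2, flipN_cons2, flipN_cons2,
        ih j t (by simpa using hj)]
      rfl

theorem myMod_length (ps : List (Int × Int)) (j : Nat) :
    (myMod ps j).length = ps.length := by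
  induction ps generalizing j with
  | nil => rfl
  | cons q ps ih => cases j <;> simp [myMod, ih]

theorem T'_eq_T2 (jl : List Nat) (ps : List (Int × Int)) (t : List Int)
    (h : ∀ j ∈ jl, j < ps.length) :
    T' (jl.map (fun (j : Nat) => (j : Int))) (flat ps ++ t) = T2 jl ps t (none, 0) := by
  induction jl generalizing ps with
  | nil => rfl
  | cons j r ih =>
    have hj : j < ps.length := h j (by simp)
    have hr : ∀ i ∈ r, i < ps.length := fun i hi => h i (by simp [hi])
    have hrm : ∀ i ∈ r, i < (myMod ps j).length := by rw [myMod_length]; exact hr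
    simp only [List.map_cons, T', T2]
    rw [flip2_flat ps j t hj, ih ps hr, ih (myMod ps j) hrm]

theorem T2_shift (jl : List Nat) (q : Int × Int) (ps : List (Int × Int)) (t : List Int)
    (s : Option Int × Int) :
    T2 (jl.map (· + 1)) (q :: ps) t s = T2 jl ps t (blk s q) := by
  induction jl generalizing s ps with
  | nil => simp only [List.map_nil, T2, flat_cons, List.cons_append, List.foldl_cons]; rfl
  | cons j r ih =>
    simp only [List.map_cons, T2]
    rw [show myMod (q :: ps) (j + 1) = q :: myMod ps j from rfl, ih, ih]

theorem T2_eq_R (ps : List (Int × Int)) (t : List Int) (s : Option Int × Int) :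
    T2 (eligIdxN ps) ps t s = R ps t s := by
  induction ps generalizing s with
  | nil => rfl
  | cons q ps ih =>
    by_cases h : q.1 < 0 ∨ q.2 < 0
    · simp only [eligIdxN, if_pos h, T2]
      rw [show myMod (q :: ps) 0 = (-q.1, -q.2) :: ps from rfl, T2_shift, T2_shift, ih, ih]
      simp [R, h]
    · simp only [eligIdxN, if_neg h]
      rw [T2_shift, ih]
      simp [R, h]

theorem eligIdxN_lt (ps : List (Int × Int)) : ∀ j ∈ eligIdxN ps, j < ps.length := by
  induction ps with
  | nil => simp [eligIdxN]
  | cons q ps ih =>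
    intro j hj
    simp only [List.length_cons]
    by_cases h : q.1 < 0 ∨ q.2 < 0
    · simp only [eligIdxN, if_pos h, List.mem_cons, List.mem_map] at hj
      rcases hj with rfl | ⟨i, hi, rfl⟩
      · omega
      · have := ih i hi; omega
    · simp only [eligIdxN, if_neg h, List.mem_map] at hj
      obtain ⟨i, hi, rfl⟩ := hj
      have := ih i hi; omega

-- ---- A's ptc equals the structural eligible-index list ----

theorem ptc_eq (ps : List (Int × Int)) (s : Int) (acc0 : List Int) :
    (PySem.List.enumerate ps s).foldl (fun acc ixy =>
        if ixy.2.1 < 0 ∨ ixy.2.2 < 0 then acc ++ [ixy.1] else acc) acc0 =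
      acc0 ++ (eligIdxN ps).map (fun (j : Nat) => s + (j : Int)) := by
  induction ps generalizing s acc0 with
  | nil => simp [PySem.List.enumerate_nil, eligIdxN]
  | cons q ps ih =>
    rw [PySem.List.enumerate_cons, List.foldl_cons]
    have hm : (eligIdxN ps).map (fun (j : Nat) => (s + 1) + (j : Int)) =
        ((eligIdxN ps).map (· + 1)).map (fun (j : Nat) => s + (j : Int)) := by
      rw [List.map_map]
      apply List.map_congr_left
      intro i _
      simp only [Function.comp_apply]
      push_cast
      ring_nf
    by_cases h : q.1 < 0 ∨ q.2 < 0
    · rw [if_pos h, ih (s + 1) (acc0 ++ [s])]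
      simp only [eligIdxN, if_pos h, List.map_cons, hm, List.append_assoc,
        List.singleton_append, Nat.cast_zero, add_zero]
    · rw [if_neg h, ih (s + 1) acc0]
      simp only [eligIdxN, if_neg h, hm]

-- ---- the pairs list decomposes arr ----

theorem flat_take (K : Nat) (arr : List Int) (h : 2 * K ≤ arr.length) :
    flat ((List.range K).map (fun k => (arr.getD (2 * k) 0, arr.getD (2 * k + 1) 0))) =
      arr.take (2 * K) := by
  induction K with
  | zero => simp [flat]
  | succ K ih =>
    have h1 : 2 * K < arr.length := by omega
    have h2 : 2 * K + 1 < arr.length := by omega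
    rw [List.range_succ, List.map_append, List.map_cons, List.map_nil]
    rw [show flat (((List.range K).map fun k => (arr.getD (2 * k) 0, arr.getD (2 * k + 1) 0)) ++
        [(arr.getD (2 * K) 0, arr.getD (2 * K + 1) 0)]) =
      flat ((List.range K).map fun k => (arr.getD (2 * k) 0, arr.getD (2 * k + 1) 0)) ++
        [arr.getD (2 * K) 0, arr.getD (2 * K + 1) 0] by simp [flat]]
    rw [ih (by omega)]
    rw [List.getD_eq_getElem _ _ h1, List.getD_eq_getElem _ _ h2]
    rw [show 2 * (K + 1) = 2 * K + 1 + 1 by ring, List.take_add_one, List.take_add_one,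
      List.getElem?_eq_getElem h2, List.getElem?_eq_getElem h1]
    simp only [Option.toList_some, List.append_assoc, List.cons_append, List.nil_append]

theorem pairs_eq (n : Int) (arr : List Int) :
    (PySem.List.pyRange 0 n 2).map (fun i =>
        (PySem.List.pyGetD arr i 0, PySem.List.pyGetD arr (i + 1) 0)) =
      (List.range (if 0 < n then ((n + 1) / 2).toNat else 0)).map
        (fun k => (arr.getD (2 * k) 0, arr.getD (2 * k + 1) 0)) := by
  rw [PySem.List.pyRange_of_pos _ _ (by norm_num : (0 : Int) < 2)]
  rw [show n - 0 + 2 - 1 = n + 1 by ring]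
  rw [List.map_map]
  apply List.map_congr_left
  intro k _
  have e1 : (0 : Int) + 2 * (k : Int) = ((2 * k : Nat) : Int) := by push_cast; ring
  have e2 : ((2 * k : Nat) : Int) + 1 = ((2 * k + 1 : Nat) : Int) := by push_cast; ring
  simp only [Function.comp_apply, e1, e2, PySem.List.pyGetD_natCast]

-- ---- mask conversion: A's Int mask fold is the Nat mask fold ----

theorem bit_test (m : Nat) (i : Nat) :
    (PySem.Int.band (m : Int) ((1 : Int) <<< i) ≠ 0) = (m.testBit i = true) := by
  have h1 : (1 : Int) <<< i = ((2 ^ i : Nat) : Int) := by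
    rw [Int.shiftLeft_eq]; push_cast; ring
  rw [h1, PySem.Int.band_natCast, Nat.and_two_pow]
  cases hb : m.testBit i <;> simp

theorem mask_conv (ptc : List Int) (arr : List Int) :
    (PySem.List.pyRange 0 ((1 : Int) <<< ptc.length) 1).foldl
      (fun best mask =>
        let curr := (List.range ptc.length).foldl (fun cur (i : Nat) =>
          if PySem.Int.band mask ((1 : Int) <<< i) ≠ 0 then flip2 cur (ptc.getD i 0)
          else cur) arr
        omax best (max_subarray_sum curr)) none =
    (List.range (2 ^ ptc.length)).foldl
      (fun acc m => omax acc (max_subarray_sum (applyM arr ptc m))) none := by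
  rw [show (1 : Int) <<< ptc.length = ((2 ^ ptc.length : Nat) : Int) by
    rw [Int.shiftLeft_eq]; push_cast; ring]
  rw [PySem.List.pyRange_zero_nat, List.foldl_map]
  refine PySem.List.foldl_congr_mem _ _ _ _ ?_
  intro acc m _
  simp only [bit_test]
  rfl

-- ===== final assembly =====

theorem main_eq (n : Int) (arr : List Int) (hpre : Pre_solve_test_case n arr) :
    solve_test_case n arr = solve_test_case_alt n arr := by
  obtain ⟨hne, hlen⟩ := hpre
  have hK2 : 2 * (if 0 < n then ((n + 1) / 2).toNat else 0) ≤ arr.length := by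
    split_ifs with hn
    · rw [PySem.Int.mod_eq_emod_of_pos (by norm_num)] at hlen
      omega
    · omega
  set K := (if 0 < n then ((n + 1) / 2).toNat else 0) with hKdef
  set P := (List.range K).map (fun k => (arr.getD (2 * k) 0, arr.getD (2 * k + 1) 0)) with hPdef
  set t := arr.drop (2 * K) with htdef
  have hsplit : arr = flat P ++ t := by
    rw [hPdef, flat_take K arr hK2, htdef, List.take_append_drop]
  have hPlen : P.length = K := by rw [hPdef]; simp
  have hnn : ∀ p ∈ (eligIdxN P).map (fun (j : Nat) => (j : Int)), 0 ≤ p := by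
    intro p hp
    simp only [List.mem_map] at hp
    obtain ⟨j, _, rfl⟩ := hp
    exact Int.natCast_nonneg j
  -- A's value
  have hA : solve_test_case n arr = (R P t (none, 0)).getD 0 := by
    simp only [solve_test_case]
    rw [pairs_eq n arr, ← hKdef, ← hPdef]
    rw [ptc_eq P 0 []]
    simp only [List.nil_append, zero_add]
    have hmc := mask_conv ((eligIdxN P).map (fun (j : Nat) => (j : Int))) arr
    simp only [] at hmc
    rw [hmc, maskfold _ hnn arr, hsplit, T'_eq_T2 _ _ _ (eligIdxN_lt P), T2_eq_R]
  -- B's value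
  have hB : solve_test_case_alt n arr = (R P t (none, 0)).getD 0 := by
    simp only [solve_test_case_alt]
    rw [pairs_eq n arr, ← hKdef, ← hPdef, hPlen]
    rw [show (2 * (K : Int)) = ((2 * K : Nat) : Int) by push_cast; ring,
      PySem.List.slice_from_natCast, ← htdef]
    have hbf := Bfold_eq_R P t (none, 0)
    simp only [] at hbf
    rw [hbf]
  rw [hA, hB]

-- ===== VERDICT (by name: the statement is the Claim_ definition above) =====
theorem solve_test_case_spec : Claim_equal_solve_test_case := by
  intro n arr _ hpre
  unfold Spec_solve_test_case
  exact main_eq n arr hpre
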